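-- pv_equiv track=rewrite | github.com/CUMT-GMSC/EMEPF | CFF_model.py | cover_num
-- ===== SOURCE A (Python) =====
-- def cover_num(S,RRs_set):
--     cover_num = 0
--     covered = [False for n in range(len(RRs_set))]
--     for nodeID in S:
--         for i in range(len(RRs_set)):
--             if nodeID in RRs_set[i][2:] and covered[i]==False:
--                 cover_num +=1
--                 covered[i] =True
--     return cover_num
-- ===== SOURCE B (Python) =====
-- def cover_num(S, RRs_set):
--     seeds = set(S)
--     return sum(1 for RR in RRs_set if not seeds.isdisjoint(RR[2:]))
-- ===== Notes on version B (the rewrite author's own statement) =====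
-- stated objective: faster
-- what changed: Replaces the nested seed-by-seed scan with a mutable covered[] array by a single pass over the RR sets, testing each RR set's tail once against a hash set of the seeds.
import Mathlib
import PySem

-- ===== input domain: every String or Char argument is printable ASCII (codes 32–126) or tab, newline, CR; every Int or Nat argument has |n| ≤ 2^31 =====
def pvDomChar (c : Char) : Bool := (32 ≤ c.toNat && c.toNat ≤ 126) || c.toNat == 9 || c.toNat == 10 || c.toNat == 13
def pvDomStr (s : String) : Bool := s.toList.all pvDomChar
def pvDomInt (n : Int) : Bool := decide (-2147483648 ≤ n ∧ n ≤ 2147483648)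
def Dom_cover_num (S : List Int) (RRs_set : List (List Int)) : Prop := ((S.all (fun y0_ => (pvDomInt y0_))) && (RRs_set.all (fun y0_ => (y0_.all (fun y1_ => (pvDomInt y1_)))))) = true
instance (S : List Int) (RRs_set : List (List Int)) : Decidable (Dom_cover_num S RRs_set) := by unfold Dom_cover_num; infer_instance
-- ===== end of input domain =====

-- B replaces A's nested seed-by-seed scan over all RR sets (with a mutable covered[] array)
-- by a single pass over the RR sets, testing each set's tail once against a set of the seeds (faster).

-- ===== PORT A =====
-- A's inner 'for i in range(len(RRs_set))' loop, acting on the state (cover_num, covered)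
def coverInner (RRs_set : List (List Int)) (nodeID : Int) (st : Int × List Bool) : Int × List Bool :=
  (PySem.List.pyRange 0 (PySem.List.len RRs_set) 1).foldl
    (fun st i =>
      if (PySem.List.slice (PySem.List.pyGetD RRs_set i []) (some 2) none).contains nodeID
          && (PySem.List.pyGetD st.2 i false == false)
      then (st.1 + 1, PySem.List.pySetD st.2 i true)
      else st)
    st

def cover_num (S : List Int) (RRs_set : List (List Int)) : Int :=
  let covered : List Bool := (PySem.List.pyRange 0 (PySem.List.len RRs_set) 1).map (fun _ => false)
  (S.foldl (fun st nodeID => coverInner RRs_set nodeID st) (0, covered)).1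

-- ===== PORT B =====
def cover_num_alt (S : List Int) (RRs_set : List (List Int)) : Int :=
  let seeds : PySem.Set Int := PySem.Set.ofList S
  RRs_set.foldl
    (fun count RR =>
      if !(PySem.Set.isdisjoint seeds (PySem.List.slice RR (some 2) none))
      then count + 1 else count)
    0

-- ===== PRECONDITION & SPEC =====
def Spec_cover_num (S : List Int) (RRs_set : List (List Int)) (out : Int) : Prop := out = cover_num_alt S RRs_set
instance (S : List Int) (RRs_set : List (List Int)) (out : Int) : Decidable (Spec_cover_num S RRs_set out) := by unfold Spec_cover_num; infer_instance

-- ===== CLAIM (what is proved, stated in full; the proofs are below) =====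
def Claim_equal_cover_num : Prop := ∀ (S : List Int) (RRs_set : List (List Int)), Dom_cover_num S RRs_set → Spec_cover_num S RRs_set (cover_num S RRs_set)

-- ===== LEMMAS AND PROOFS =====

def hits (nodeID : Int) (rr : List Int) : Bool :=
  (PySem.List.slice rr (some 2) none).contains nodeID

def stepF (node : Int) (rrs : List (List Int)) (st : Int × List Bool) (i : Int) : Int × List Bool :=
  if hits node (PySem.List.pyGetD rrs i []) && (PySem.List.pyGetD st.2 i false == false)
  then (st.1 + 1, PySem.List.pySetD st.2 i true)
  else st

lemma coverInner_eq_stepF (rrs : List (List Int)) (node : Int) (st : Int × List Bool) :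
    coverInner rrs node st
      = (PySem.List.pyRange 0 (PySem.List.len rrs) 1).foldl (stepF node rrs) st := rfl

lemma pySetD_natCast_set {α : Type} (xs : List α) (k : Nat) (v : α) :
    PySem.List.pySetD xs (k : Int) v = xs.set k v := by
  by_cases h : k < xs.length
  · simp [PySem.List.pySetD, PySem.List.pySet?_natCast xs k v h]
  · have h1 : PySem.List.pySet? xs (k : Int) v = none := by
      rw [PySem.List.pySet?_eq_none_iff]
      simp [PySem.Raise.InRange]
      omega
    simp [PySem.List.pySetD, h1]
    exact (List.set_eq_of_length_le (by omega)).symm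

lemma fold_shift (node : Int) (rr0 : List Int) (rrs : List (List Int)) :
    ∀ (l : List Nat) (c : Int) (b : Bool) (cov : List Bool),
      l.foldl (fun st (k : Nat) => stepF node (rr0 :: rrs) st (1 + (k : Int))) (c, b :: cov)
        = ((l.foldl (fun st (k : Nat) => stepF node rrs st ((k : Nat) : Int)) (c, cov)).1,
           b :: (l.foldl (fun st (k : Nat) => stepF node rrs st ((k : Nat) : Int)) (c, cov)).2) := by
  intro l
  induction l with
  | nil => intro c b cov; simp
  | cons k l ih =>
    intro c b cov
    have hcast : (1 : Int) + (k : Int) = ((k + 1 : Nat) : Int) := by push_cast; ring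
    have hstep : stepF node (rr0 :: rrs) (c, b :: cov) (1 + (k : Int))
        = ((stepF node rrs (c, cov) (k : Int)).1,
           b :: (stepF node rrs (c, cov) (k : Int)).2) := by
      simp only [stepF, hcast, PySem.List.pyGetD_natCast, pySetD_natCast_set,
        List.getD_cons_succ, List.set_cons_succ]
      split <;> simp
    rw [List.foldl_cons, List.foldl_cons, hstep, ih]

lemma inner_eq (node : Int) :
    ∀ (rrs : List (List Int)) (cov : List Bool) (c : Int), cov.length = rrs.length →
      coverInner rrs node (c, cov)
        = (c + ((rrs.zip cov).countP (fun pr => hits node pr.1 && !pr.2) : Int),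
           List.zipWith (fun rr b => b || hits node rr) rrs cov) := by
  intro rrs
  induction rrs with
  | nil =>
    intro cov c h
    have : cov = [] := List.eq_nil_of_length_eq_zero h
    subst this
    simp [coverInner]
  | cons rr rrs ih =>
    intro cov c h
    cases cov with
    | nil => simp at h
    | cons b cov =>
      simp only [List.length_cons] at h
      have hlen : cov.length = rrs.length := by omega
      rw [coverInner_eq_stepF]
      have hn : PySem.List.len (rr :: rrs) = ((rrs.length : Int) + 1) := by
        simp
      rw [hn, PySem.List.pyRange_one_cons (by positivity)]
      have h01 : (0 : Int) + 1 = 1 := by norm_num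
      rw [h01]
      have hr : PySem.List.pyRange 1 ((rrs.length : Int) + 1) 1
          = (List.range rrs.length).map (fun (k : Nat) => 1 + (k : Int)) := by
        have he : ((rrs.length : Int) + 1 - 1).toNat = rrs.length := by omega
        rw [PySem.List.pyRange_one, he]
      have hr0 : PySem.List.pyRange 0 (PySem.List.len rrs) 1
          = (List.range rrs.length).map (fun (k : Nat) => ((k : Nat) : Int)) := by
        rw [PySem.List.pyRange_one]
        simp
      rw [List.foldl_cons, hr, List.foldl_map]
      have hstep0 : stepF node (rr :: rrs) (c, b :: cov) 0
          = (c + (if hits node rr && !b then 1 else 0),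
             (b || hits node rr) :: cov) := by
        simp only [stepF, PySem.List.pyGetD_zero_cons]
        have h0 : ∀ (x : Bool), PySem.List.pySetD (x :: cov) ((0 : Nat) : Int) true = true :: cov := by
          intro x; rw [pySetD_natCast_set]; rfl
        simp only [Int.natCast_zero] at h0
        cases b <;> cases hits node rr <;> simp [h0]
      rw [hstep0, fold_shift]
      have htail : (List.range rrs.length).foldl (fun st (k : Nat) => stepF node rrs st ((k : Nat) : Int))
            (c + (if hits node rr && !b then 1 else 0), cov)
          = coverInner rrs node (c + (if hits node rr && !b then 1 else 0), cov) := by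
        rw [coverInner_eq_stepF, hr0, List.foldl_map]
      rw [htail, ih cov _ hlen]
      simp only [List.zip_cons_cons, List.countP_cons, List.zipWith_cons_cons]
      rw [Prod.mk.injEq]
      constructor
      · cases hits node rr <;> cases b <;> simp <;> push_cast <;> ring
      · rfl

lemma zipWith_zipWith {α β : Type} (g h : α → β → β) :
    ∀ (rrs : List α) (cov : List β),
      List.zipWith g rrs (List.zipWith h rrs cov)
        = List.zipWith (fun a b => g a (h a b)) rrs cov := by
  intro rrs
  induction rrs with
  | nil => intro cov; simp
  | cons rr rrs ih =>
    intro cov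
    cases cov with
    | nil => simp
    | cons b cov => simp [ih]

lemma count_merge (p q : List Int → Bool) :
    ∀ (rrs : List (List Int)) (cov : List Bool),
      (rrs.zip cov).countP (fun pr => p pr.1 && !pr.2)
        + (rrs.zip (List.zipWith (fun a b => b || p a) rrs cov)).countP
            (fun pr => q pr.1 && !pr.2)
        = (rrs.zip cov).countP (fun pr => (p pr.1 || q pr.1) && !pr.2) := by
  intro rrs
  induction rrs with
  | nil => intro cov; simp
  | cons rr rrs ih =>
    intro cov
    cases cov with
    | nil => simp
    | cons b cov =>
      simp only [List.zipWith_cons_cons, List.zip_cons_cons, List.countP_cons]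
      cases hp : p rr <;> cases hq : q rr <;> cases b <;>
        simp [hp, hq, ← ih cov] <;> omega

lemma zipWith_snd {α β : Type} :
    ∀ (rrs : List α) (cov : List β), cov.length = rrs.length →
      List.zipWith (fun _ b => b) rrs cov = cov := by
  intro rrs
  induction rrs with
  | nil => intro cov h; simp_all
  | cons rr rrs ih =>
    intro cov h
    cases cov with
    | nil => simp at h
    | cons b cov =>
      simp only [List.zipWith_cons_cons]
      rw [ih cov (by simpa using Nat.succ_injective (by simpa using h))]

lemma outer_eq :
    ∀ (S : List Int) (rrs : List (List Int)) (cov : List Bool) (c : Int),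
      cov.length = rrs.length →
      S.foldl (fun st node => coverInner rrs node st) (c, cov)
        = (c + ((rrs.zip cov).countP (fun pr => S.any (fun s => hits s pr.1) && !pr.2) : Int),
           List.zipWith (fun rr b => b || S.any (fun s => hits s rr)) rrs cov) := by
  intro S
  induction S with
  | nil =>
    intro rrs cov c h
    simp only [List.foldl_nil, List.any_nil]
    rw [Prod.mk.injEq]
    constructor
    · simp
    · rw [show (fun (rr : List Int) (b : Bool) => b || false) = (fun (_ : List Int) (b : Bool) => b) from by funext rr b; simp]
      exact (zipWith_snd rrs cov h).symm
  | cons node S ih =>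
    intro rrs cov c h
    rw [List.foldl_cons, inner_eq node rrs cov c h,
        ih rrs _ _ (by rw [List.length_zipWith]; omega)]
    rw [zipWith_zipWith]
    rw [Prod.mk.injEq]
    constructor
    · have hc := count_merge (fun rr => hits node rr) (fun rr => S.any (fun s => hits s rr)) rrs cov
      simp only [List.any_cons]
      push_cast [← hc]
      ring
    · simp [List.any_cons, Bool.or_assoc]

lemma zip_replicate_false_countP (f : List Int → Bool) :
    ∀ (rrs : List (List Int)),
      (rrs.zip (List.replicate rrs.length false)).countP (fun pr => f pr.1 && !pr.2)
        = rrs.countP f := by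
  intro rrs
  induction rrs with
  | nil => simp
  | cons rr rrs ih => simp [List.replicate_succ, List.countP_cons, ih]

lemma cover_num_eq_countP (S : List Int) (rrs : List (List Int)) :
    cover_num S rrs = (rrs.countP (fun rr => S.any (fun s => hits s rr)) : Int) := by
  show (S.foldl (fun st nodeID => coverInner rrs nodeID st)
      (0, (PySem.List.pyRange 0 (PySem.List.len rrs) 1).map (fun _ => false))).1 = _
  have hcov : (PySem.List.pyRange 0 (PySem.List.len rrs) 1).map (fun _ => false)
      = List.replicate rrs.length false := by
    rw [List.map_const']
    congr 1
    rw [PySem.List.length_pyRange_one]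
    simp
  rw [hcov, outer_eq S rrs _ 0 (by simp)]
  dsimp only
  rw [zip_replicate_false_countP (fun rr => S.any (fun s => hits s rr)) rrs]
  simp

lemma foldl_ifcount (p : List Int → Bool) :
    ∀ (l : List (List Int)) (c : Int),
      l.foldl (fun c x => if p x then c + 1 else c) c = c + (l.countP p : Int) := by
  intro l
  induction l with
  | nil => intro c; simp
  | cons x l ih =>
    intro c
    rw [List.foldl_cons, List.countP_cons]
    cases hp : p x <;> simp [hp, ih] <;> push_cast <;> ring

lemma alt_cond (S : List Int) (rr : List Int) :
    (!(PySem.Set.isdisjoint (PySem.Set.ofList S) (PySem.List.slice rr (some 2) none)))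
      = S.any (fun s => hits s rr) := by
  rw [Bool.eq_iff_iff]
  simp [PySem.Set.isdisjoint, hits, List.any_eq_true, PySem.Set.mem_ofList]

lemma cover_num_alt_eq_countP (S : List Int) (rrs : List (List Int)) :
    cover_num_alt S rrs = (rrs.countP (fun rr => S.any (fun s => hits s rr)) : Int) := by
  unfold cover_num_alt
  calc rrs.foldl (fun count RR =>
          if !(PySem.Set.isdisjoint (PySem.Set.ofList S) (PySem.List.slice RR (some 2) none))
          then count + 1 else count) 0
      = rrs.foldl (fun count RR =>
          if S.any (fun s => hits s RR) then count + 1 else count) 0 := by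
        simp only [alt_cond]
    _ = 0 + (rrs.countP (fun rr => S.any (fun s => hits s rr)) : Int) :=
        foldl_ifcount _ rrs 0
    _ = _ := by ring

-- ===== VERDICT (by name: the statement is the Claim_ definition above) =====
theorem cover_num_spec : Claim_equal_cover_num := by
  intro S RRs_set _
  unfold Spec_cover_num
  rw [cover_num_eq_countP, cover_num_alt_eq_countP]
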